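-- pv_equiv track=rewrite | github.com/Ankitkr20/restaurant-recommender | app/main.py | infer_category_from_name
-- ===== SOURCE A (Python) =====
-- def infer_category_from_name(name: str) -> str:
--     low = name.lower()
--
--     if "thali" in low:
--         return "Indian Veg Thali"
--     if "rice bowl" in low:
--         return "Rice Bowl"
--     if any(k in low for k in [
--         "dal fry", "aloo jeera", "dum aloo",
--         "dal makhni", "chana masala",
--         "matar paneer", "mushroom masala",
--         "shahi paneer", "paneer lababdar"
--     ]):
--         return "Main Course"
--     if any(k in low for k in ["biryani", "jeera rice", "pulao"]):
--         return "Rice"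
--     if "fried rice" in low or "singapore rice" in low:
--         return "Fried Rice"
--     if "momo" in low or "momos" in low:
--         return "Momos"
--     if any(k in low for k in ["roti", "prantha", "parantha"]):
--         return "Indian Breads"
--     if any(k in low for k in ["curd", "raita", "papad", "salad"]):
--         return "Extras"
--     if "mojito" in low:
--         return "Mojito"
--     if "krusher" in low:
--         return "Krushers"
--     if any(k in low for k in ["tea", "lassi", "coffee", "shake", "soft drinks", "soft drink"]):
--         return "Beverage"
--
--     if any(k in low for k in ["maggi"]):
--         return "Maggi"
--     if any(k in low for k in ["dosa", "uttapam", "idli", "sambhar", "punugullu"]):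
--         return "South Indian"
--     if any(k in low for k in ["burger", "fries"]):
--         return "Burger & Fries"
--     if any(k in low for k in ["noodles", "chowmein"]):
--         return "Noodles"
--     if "wrap" in low:
--         return "Wraps"
--     if "pasta" in low:
--         return "Pasta"
--     if "sandwich" in low:
--         return "Sandwich"
--     if "pizza" in low:
--         return "Pizza"
--     if any(k in low for k in ["breakfast", "poha", "upma", "bhatura"]):
--         return "Breakfast"
--     if any(k in low for k in ["chinese platter", "chinese combo"]):
--         return "Chinese Combo"
--     if any(k in low for k in ["corn", "spring roll", "manchurian", "chilli", "garlic bread",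
--                               "paneer 65", "cheese finger", "champ"]):
--         return "Snacks"
--
--     return ""
-- ===== SOURCE B (Python) =====
-- # B: position-driven prefix scan — walk every position of the lowercased name,
-- # look its two-character window up in a prefix index of the rule table, collect
-- # the table index of every rule whose keyword begins there, and answer with the
-- # best (lowest) priority; replaces A's cascade of substring searches.
-- RULES = [
--     ("thali", "Indian Veg Thali"),
--     ("rice bowl", "Rice Bowl"),
--     ("dal fry", "Main Course"), ("aloo jeera", "Main Course"), ("dum aloo", "Main Course"),
--     ("dal makhni", "Main Course"), ("chana masala", "Main Course"),
--     ("matar paneer", "Main Course"), ("mushroom masala", "Main Course"),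
--     ("shahi paneer", "Main Course"), ("paneer lababdar", "Main Course"),
--     ("biryani", "Rice"), ("jeera rice", "Rice"), ("pulao", "Rice"),
--     ("fried rice", "Fried Rice"), ("singapore rice", "Fried Rice"),
--     ("momo", "Momos"), ("momos", "Momos"),
--     ("roti", "Indian Breads"), ("prantha", "Indian Breads"), ("parantha", "Indian Breads"),
--     ("curd", "Extras"), ("raita", "Extras"), ("papad", "Extras"), ("salad", "Extras"),
--     ("mojito", "Mojito"),
--     ("krusher", "Krushers"),
--     ("tea", "Beverage"), ("lassi", "Beverage"), ("coffee", "Beverage"),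
--     ("shake", "Beverage"), ("soft drinks", "Beverage"), ("soft drink", "Beverage"),
--     ("maggi", "Maggi"),
--     ("dosa", "South Indian"), ("uttapam", "South Indian"), ("idli", "South Indian"),
--     ("sambhar", "South Indian"), ("punugullu", "South Indian"),
--     ("burger", "Burger & Fries"), ("fries", "Burger & Fries"),
--     ("noodles", "Noodles"), ("chowmein", "Noodles"),
--     ("wrap", "Wraps"),
--     ("pasta", "Pasta"),
--     ("sandwich", "Sandwich"),
--     ("pizza", "Pizza"),
--     ("breakfast", "Breakfast"), ("poha", "Breakfast"), ("upma", "Breakfast"), ("bhatura", "Breakfast"),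
--     ("chinese platter", "Chinese Combo"), ("chinese combo", "Chinese Combo"),
--     ("corn", "Snacks"), ("spring roll", "Snacks"), ("manchurian", "Snacks"),
--     ("chilli", "Snacks"), ("garlic bread", "Snacks"), ("paneer 65", "Snacks"),
--     ("cheese finger", "Snacks"), ("champ", "Snacks"),
-- ]
--
-- HEADS = {}
-- for p, (kw, _) in enumerate(RULES):
--     HEADS.setdefault(kw[:2], []).append((p, kw))
--
-- def infer_category_from_name(name: str) -> str:
--     low = name.lower()
--     hits = [p
--             for i in range(len(low))
--             for p, kw in HEADS.get(low[i:i+2], [])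
--             if low.startswith(kw, i)]
--     return RULES[min(hits)][1] if hits else ""
-- ===== Notes on version B (the rewrite author's own statement) =====
-- stated objective: alternative
-- what changed: Replaces A's priority cascade of substring searches by a position-driven scan: for every start position of the lowercased name it collects the table index of each rule whose keyword begins there, then returns the category of the minimum collected priority.
import Mathlib
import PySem

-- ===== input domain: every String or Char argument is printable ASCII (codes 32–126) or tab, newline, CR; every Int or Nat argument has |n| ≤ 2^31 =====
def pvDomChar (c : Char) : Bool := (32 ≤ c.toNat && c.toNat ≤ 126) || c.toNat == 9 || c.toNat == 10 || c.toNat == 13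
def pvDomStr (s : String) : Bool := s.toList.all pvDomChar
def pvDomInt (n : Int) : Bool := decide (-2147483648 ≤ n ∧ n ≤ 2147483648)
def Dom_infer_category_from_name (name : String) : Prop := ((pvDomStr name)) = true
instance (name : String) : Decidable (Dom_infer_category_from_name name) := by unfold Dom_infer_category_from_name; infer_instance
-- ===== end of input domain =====

-- B replaces A's priority cascade of substring searches by a position-driven prefix
-- scan over a two-character prefix index of the rule table: it collects the table
-- index of every rule whose keyword starts at any position of the lowercased name
-- and returns the best (lowest) priority (objective: alternative; same outputs).

-- ===== PORT A =====
def infer_category_from_name (name : String) : String :=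
  let low := PySem.Str.lower name
  if PySem.Str.isIn "thali" low then "Indian Veg Thali"
  else if PySem.Str.isIn "rice bowl" low then "Rice Bowl"
  else if (["dal fry", "aloo jeera", "dum aloo", "dal makhni", "chana masala",
            "matar paneer", "mushroom masala", "shahi paneer", "paneer lababdar"].any
            (fun k => PySem.Str.isIn k low)) then "Main Course"
  else if (["biryani", "jeera rice", "pulao"].any (fun k => PySem.Str.isIn k low)) then "Rice"
  else if PySem.Str.isIn "fried rice" low || PySem.Str.isIn "singapore rice" low then "Fried Rice"
  else if PySem.Str.isIn "momo" low || PySem.Str.isIn "momos" low then "Momos"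
  else if (["roti", "prantha", "parantha"].any (fun k => PySem.Str.isIn k low)) then "Indian Breads"
  else if (["curd", "raita", "papad", "salad"].any (fun k => PySem.Str.isIn k low)) then "Extras"
  else if PySem.Str.isIn "mojito" low then "Mojito"
  else if PySem.Str.isIn "krusher" low then "Krushers"
  else if (["tea", "lassi", "coffee", "shake", "soft drinks", "soft drink"].any
            (fun k => PySem.Str.isIn k low)) then "Beverage"
  else if (["maggi"].any (fun k => PySem.Str.isIn k low)) then "Maggi"
  else if (["dosa", "uttapam", "idli", "sambhar", "punugullu"].any
            (fun k => PySem.Str.isIn k low)) then "South Indian"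
  else if (["burger", "fries"].any (fun k => PySem.Str.isIn k low)) then "Burger & Fries"
  else if (["noodles", "chowmein"].any (fun k => PySem.Str.isIn k low)) then "Noodles"
  else if PySem.Str.isIn "wrap" low then "Wraps"
  else if PySem.Str.isIn "pasta" low then "Pasta"
  else if PySem.Str.isIn "sandwich" low then "Sandwich"
  else if PySem.Str.isIn "pizza" low then "Pizza"
  else if (["breakfast", "poha", "upma", "bhatura"].any (fun k => PySem.Str.isIn k low)) then "Breakfast"
  else if (["chinese platter", "chinese combo"].any (fun k => PySem.Str.isIn k low)) then "Chinese Combo"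
  else if (["corn", "spring roll", "manchurian", "chilli", "garlic bread",
            "paneer 65", "cheese finger", "champ"].any (fun k => PySem.Str.isIn k low)) then "Snacks"
  else ""

-- ===== PORT B =====
def pvRules : List (String × String) :=
  [("thali", "Indian Veg Thali"),
   ("rice bowl", "Rice Bowl"),
   ("dal fry", "Main Course"), ("aloo jeera", "Main Course"), ("dum aloo", "Main Course"),
   ("dal makhni", "Main Course"), ("chana masala", "Main Course"),
   ("matar paneer", "Main Course"), ("mushroom masala", "Main Course"),
   ("shahi paneer", "Main Course"), ("paneer lababdar", "Main Course"),
   ("biryani", "Rice"), ("jeera rice", "Rice"), ("pulao", "Rice"),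
   ("fried rice", "Fried Rice"), ("singapore rice", "Fried Rice"),
   ("momo", "Momos"), ("momos", "Momos"),
   ("roti", "Indian Breads"), ("prantha", "Indian Breads"), ("parantha", "Indian Breads"),
   ("curd", "Extras"), ("raita", "Extras"), ("papad", "Extras"), ("salad", "Extras"),
   ("mojito", "Mojito"),
   ("krusher", "Krushers"),
   ("tea", "Beverage"), ("lassi", "Beverage"), ("coffee", "Beverage"),
   ("shake", "Beverage"), ("soft drinks", "Beverage"), ("soft drink", "Beverage"),
   ("maggi", "Maggi"),
   ("dosa", "South Indian"), ("uttapam", "South Indian"), ("idli", "South Indian"),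
   ("sambhar", "South Indian"), ("punugullu", "South Indian"),
   ("burger", "Burger & Fries"), ("fries", "Burger & Fries"),
   ("noodles", "Noodles"), ("chowmein", "Noodles"),
   ("wrap", "Wraps"),
   ("pasta", "Pasta"),
   ("sandwich", "Sandwich"),
   ("pizza", "Pizza"),
   ("breakfast", "Breakfast"), ("poha", "Breakfast"), ("upma", "Breakfast"), ("bhatura", "Breakfast"),
   ("chinese platter", "Chinese Combo"), ("chinese combo", "Chinese Combo"),
   ("corn", "Snacks"), ("spring roll", "Snacks"), ("manchurian", "Snacks"),
   ("chilli", "Snacks"), ("garlic bread", "Snacks"), ("paneer 65", "Snacks"),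
   ("cheese finger", "Snacks"), ("champ", "Snacks")]

-- port of Source B's module-level HEADS loop: keys are the 2-char slices kw[:2] and the
-- stored keywords, represented on the List Char side (String.toList bridge; kw[:2]
-- = toList.take 2 by slice_to_natCast); setdefault(...).append is Dict.modify with
-- default [] and append, exactly Python's in-place grouping.
def pvHeads : PySem.Dict (List Char) (List (Int × List Char)) :=
  ((PySem.List.enumerate pvRules 0).map (fun pr =>
      (pr.2.1.toList.take 2, (pr.1, pr.2.1.toList)))).foldl
    (fun d p => d.modify p.1 [] (· ++ [p.2])) PySem.Dict.empty

-- port of Source B's 'hits' comprehension: 'range(len(low))' has nonnegative bounds, so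
-- List.range is exact; 'low[i:i+2]' with 0 ≤ i is (low.drop i).take 2
-- (slice_natCast_add); 'low.startswith(kw, i)' with 0 ≤ i ≤ len(low) is exactly
-- startswith on low[i:], ported as Chars.startswith on low.drop i.
def pvHits (low : List Char) : List Int :=
  (List.range low.length).flatMap (fun i =>
    (PySem.Dict.getD pvHeads ((low.drop i).take 2) []).filterMap (fun pk =>
      if PySem.Chars.startswith (low.drop i) pk.2 then some pk.1 else none))

-- 'RULES[min(hits)]' via pyGet? (the index is always in range when hits ≠ []).
def infer_category_from_name_alt (name : String) : String :=
  let low := (PySem.Str.lower name).toList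
  match PySem.List.min? (pvHits low) (fun x => x) with
  | some m => ((PySem.List.pyGet? pvRules m).map Prod.snd).getD ""
  | none => ""

-- ===== PRECONDITION & SPEC =====
def Spec_infer_category_from_name (name : String) (out : String) : Prop := out = infer_category_from_name_alt name
instance (name : String) (out : String) : Decidable (Spec_infer_category_from_name name out) := by unfold Spec_infer_category_from_name; infer_instance

-- ===== CLAIM (what is proved, stated in full; the proofs are below) =====
def Claim_equal_infer_category_from_name : Prop := ∀ (name : String), Dom_infer_category_from_name name → Spec_infer_category_from_name name (infer_category_from_name name)

-- ===== LEMMAS AND PROOFS =====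
-- proof-only helpers: a grouped view of the keyword table
def pvGroups : List (List String × String) :=
  [(["thali"], "Indian Veg Thali"),
   (["rice bowl"], "Rice Bowl"),
   (["dal fry", "aloo jeera", "dum aloo", "dal makhni", "chana masala", "matar paneer", "mushroom masala", "shahi paneer", "paneer lababdar"], "Main Course"),
   (["biryani", "jeera rice", "pulao"], "Rice"),
   (["fried rice", "singapore rice"], "Fried Rice"),
   (["momo", "momos"], "Momos"),
   (["roti", "prantha", "parantha"], "Indian Breads"),
   (["curd", "raita", "papad", "salad"], "Extras"),
   (["mojito"], "Mojito"),
   (["krusher"], "Krushers"),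
   (["tea", "lassi", "coffee", "shake", "soft drinks", "soft drink"], "Beverage"),
   (["maggi"], "Maggi"),
   (["dosa", "uttapam", "idli", "sambhar", "punugullu"], "South Indian"),
   (["burger", "fries"], "Burger & Fries"),
   (["noodles", "chowmein"], "Noodles"),
   (["wrap"], "Wraps"),
   (["pasta"], "Pasta"),
   (["sandwich"], "Sandwich"),
   (["pizza"], "Pizza"),
   (["breakfast", "poha", "upma", "bhatura"], "Breakfast"),
   (["chinese platter", "chinese combo"], "Chinese Combo"),
   (["corn", "spring roll", "manchurian", "chilli", "garlic bread", "paneer 65", "cheese finger", "champ"], "Snacks")]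

def pvGroupCascade (f : String → Bool) : List (List String × String) → String
  | [] => ""
  | g :: gs => if g.1.any f then g.2 else pvGroupCascade f gs

theorem pvRules_eq_flat :
    pvRules = pvGroups.flatMap (fun g => g.1.map (fun k => (k, g.2))) := rfl

theorem find_group_step (f : String → Bool) (ks : List String) (c : String)
    (rest : List (String × String)) :
    (((ks.map (fun k => (k, c)) ++ rest).find? (fun p => f p.1)).map Prod.snd) =
      (if ks.any f then some c else ((rest.find? (fun p => f p.1)).map Prod.snd)) := by
  induction ks with
  | nil => simp
  | cons k ks ih =>
    simp only [List.map_cons, List.cons_append, List.any_cons]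
    by_cases h : f k
    · rw [List.find?_cons_of_pos (by exact h)]; simp [h]
    · rw [List.find?_cons_of_neg (by simpa using h), ih]; simp [h]

theorem flat_find_eq_cascade (f : String → Bool) (gs : List (List String × String)) :
    (((gs.flatMap (fun g => g.1.map (fun k => (k, g.2)))).find?
        (fun p => f p.1)).map Prod.snd).getD "" =
      pvGroupCascade f gs := by
  induction gs with
  | nil => simp [pvGroupCascade]
  | cons g gs ih =>
    rw [List.flatMap_cons, find_group_step]
    by_cases h : g.1.any f
    · simp [pvGroupCascade, h]
    · simp only [pvGroupCascade, h, Bool.false_eq_true, if_false]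
      exact ih

theorem cascade_eq_A_core (low : String) :
    pvGroupCascade (fun k => PySem.Str.isIn k low) pvGroups =
      (if PySem.Str.isIn "thali" low then "Indian Veg Thali"
       else if PySem.Str.isIn "rice bowl" low then "Rice Bowl"
       else if (["dal fry", "aloo jeera", "dum aloo", "dal makhni", "chana masala",
                 "matar paneer", "mushroom masala", "shahi paneer", "paneer lababdar"].any
                 (fun k => PySem.Str.isIn k low)) then "Main Course"
       else if (["biryani", "jeera rice", "pulao"].any (fun k => PySem.Str.isIn k low)) then "Rice"
       else if PySem.Str.isIn "fried rice" low || PySem.Str.isIn "singapore rice" low then "Fried Rice"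
       else if PySem.Str.isIn "momo" low || PySem.Str.isIn "momos" low then "Momos"
       else if (["roti", "prantha", "parantha"].any (fun k => PySem.Str.isIn k low)) then "Indian Breads"
       else if (["curd", "raita", "papad", "salad"].any (fun k => PySem.Str.isIn k low)) then "Extras"
       else if PySem.Str.isIn "mojito" low then "Mojito"
       else if PySem.Str.isIn "krusher" low then "Krushers"
       else if (["tea", "lassi", "coffee", "shake", "soft drinks", "soft drink"].any
                 (fun k => PySem.Str.isIn k low)) then "Beverage"
       else if (["maggi"].any (fun k => PySem.Str.isIn k low)) then "Maggi"
       else if (["dosa", "uttapam", "idli", "sambhar", "punugullu"].any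
                 (fun k => PySem.Str.isIn k low)) then "South Indian"
       else if (["burger", "fries"].any (fun k => PySem.Str.isIn k low)) then "Burger & Fries"
       else if (["noodles", "chowmein"].any (fun k => PySem.Str.isIn k low)) then "Noodles"
       else if PySem.Str.isIn "wrap" low then "Wraps"
       else if PySem.Str.isIn "pasta" low then "Pasta"
       else if PySem.Str.isIn "sandwich" low then "Sandwich"
       else if PySem.Str.isIn "pizza" low then "Pizza"
       else if (["breakfast", "poha", "upma", "bhatura"].any (fun k => PySem.Str.isIn k low)) then "Breakfast"
       else if (["chinese platter", "chinese combo"].any (fun k => PySem.Str.isIn k low)) then "Chinese Combo"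
       else if (["corn", "spring roll", "manchurian", "chilli", "garlic bread",
                 "paneer 65", "cheese finger", "champ"].any (fun k => PySem.Str.isIn k low)) then "Snacks"
       else "") := by
  simp only [pvGroups, pvGroupCascade, List.any_cons, List.any_nil, Bool.or_false]

-- A equals the first-match find? over the flat rule table
theorem A_eq_find (name : String) :
    infer_category_from_name name =
      ((pvRules.find? (fun p => PySem.Str.isIn p.1 (PySem.Str.lower name))).map Prod.snd).getD "" := by
  rw [pvRules_eq_flat,
    flat_find_eq_cascade (fun k => PySem.Str.isIn k (PySem.Str.lower name)) pvGroups,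
    cascade_eq_A_core (PySem.Str.lower name)]
  rfl

-- every keyword of the table has at least two characters
theorem pvRules_kw_len : ∀ k (h : k < pvRules.length), 2 ≤ pvRules[k].1.toList.length := by decide

-- find? = some at the least matching index
theorem find?_of_least {α : Type} (f : α → Bool) (l : List α) (i : Nat) (hi : i < l.length)
    (hf : f (l[i]'hi) = true) (hmin : ∀ j (hj : j < l.length), j < i → f (l[j]'hj) = false) :
    l.find? f = some (l[i]'hi) := by
  induction l generalizing i with
  | nil => simp at hi
  | cons a t ih =>
    cases i with
    | zero =>
      simp only [List.getElem_cons_zero] at hf ⊢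
      exact List.find?_cons_of_pos hf
    | succ k =>
      have h0 : f a = false := hmin 0 (by simp) (Nat.succ_pos k)
      rw [List.find?_cons_of_neg (by simp [h0])]
      exact ih k (by simpa using hi) (by simpa using hf)
        (fun j hj hjk => hmin (j+1) (by simpa using hj) (by omega))

-- membership in B's hits list ↔ the rule's keyword occurs in the lowered name
theorem mem_hits_iff (low : List Char) (x : Int) :
    (x ∈ pvHits low) ↔
      ∃ k : Nat, x = (k : Int) ∧ ∃ h : k < pvRules.length,
        PySem.Chars.isIn (pvRules[k].1.toList) low = true := by
  unfold pvHits
  have hheads : ∀ c, PySem.Dict.getD pvHeads c [] =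
      (((PySem.List.enumerate pvRules 0).map (fun pr =>
          (pr.2.1.toList.take 2, (pr.1, pr.2.1.toList)))).filter
            (fun p => p.1 == c)).map (·.2) := by
    intro c
    unfold pvHeads
    rw [PySem.Dict.getD_foldl_modify_append]
    simp [PySem.Dict.getD_empty]
  constructor
  · rintro hx
    rcases List.mem_flatMap.1 hx with ⟨i, hi, hx⟩
    rcases List.mem_filterMap.1 hx with ⟨pk, hpk, heq⟩
    rw [hheads] at hpk
    rcases List.mem_map.1 hpk with ⟨q, hq, rfl⟩
    rcases List.mem_map.1 (List.mem_filter.1 hq).1 with ⟨pr, hpr, rfl⟩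
    rcases (PySem.List.mem_enumerate_iff pvRules 0 pr).1 hpr with ⟨k, hk, rfl⟩
    by_cases hsw : PySem.Chars.startswith (low.drop i) (pvRules[k]).1.toList = true
    · refine ⟨k, ?_, hk, ?_⟩
      · simp [hsw] at heq; omega
      · exact (PySem.Chars.exists_prefix_drop_iff_isIn _ _).1
          ⟨i, (PySem.Chars.startswith_iff _ _).1 hsw⟩
    · simp [hsw] at heq
  · rintro ⟨k, rfl, hk, hin⟩
    rcases (PySem.Chars.exists_prefix_drop_iff_isIn _ _).2 hin with ⟨j, hj⟩
    have hlen2 := pvRules_kw_len k hk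
    obtain ⟨t, ht⟩ := hj
    have hdlen : 2 ≤ (low.drop j).length := by
      rw [← ht, List.length_append]; omega
    have hjlt : j < low.length := by
      have := List.length_drop (l := low) (i := j)
      omega
    refine List.mem_flatMap.2 ⟨j, List.mem_range.2 hjlt,
      List.mem_filterMap.2 ⟨((0 : Int) + (k : Int), pvRules[k].1.toList), ?_, ?_⟩⟩
    · rw [hheads]
      refine List.mem_map.2
        ⟨(pvRules[k].1.toList.take 2, ((0 : Int) + (k : Int), pvRules[k].1.toList)),
         List.mem_filter.2 ⟨List.mem_map.2
           ⟨((0 : Int) + (k : Int), pvRules[k]),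
            (PySem.List.mem_enumerate_iff pvRules 0 _).2 ⟨k, hk, rfl⟩, rfl⟩, ?_⟩, rfl⟩
      have hkey : (low.drop j).take 2 = pvRules[k].1.toList.take 2 := by
        rw [← ht, List.take_append_of_le_length hlen2]
      simp [hkey]
    · have hsw : PySem.Chars.startswith (low.drop j) (pvRules[k].1.toList) = true :=
        (PySem.Chars.startswith_iff _ _).2 ⟨t, ht⟩
      simp [hsw]

-- B equals the same first-match find?
theorem B_eq_find (name : String) :
    infer_category_from_name_alt name =
      ((pvRules.find? (fun p => PySem.Str.isIn p.1 (PySem.Str.lower name))).map Prod.snd).getD "" := by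
  show (match PySem.List.min? (pvHits ((PySem.Str.lower name).toList)) (fun x => x) with
        | some m => ((PySem.List.pyGet? pvRules m).map Prod.snd).getD ""
        | none => "") = _
  set low := (PySem.Str.lower name).toList with hlow
  have hstr : ∀ p : String × String, PySem.Str.isIn p.1 (PySem.Str.lower name) =
      PySem.Chars.isIn p.1.toList low := by
    intro p; simp [hlow]
  cases hmin : PySem.List.min? (pvHits low) (fun x => x) with
  | none =>
    have hnil : pvHits low = [] := (PySem.List.min?_eq_none_iff (pvHits low) (fun x => x)).1 hmin
    have hnone : pvRules.find? (fun p => PySem.Str.isIn p.1 (PySem.Str.lower name)) = none := by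
      rw [List.find?_eq_none]
      intro p hp hf
      rcases List.getElem_of_mem hp with ⟨k, hk, rfl⟩
      have : (k : Int) ∈ pvHits low :=
        (mem_hits_iff low (k : Int)).2 ⟨k, rfl, hk, by rw [← hstr]; exact hf⟩
      rw [hnil] at this; simp at this
    rw [hnone]; rfl
  | some m =>
    have hmem := PySem.List.min?_mem hmin
    have hisMin := PySem.List.min?_isMin hmin
    rcases (mem_hits_iff low m).1 hmem with ⟨k, rfl, hk, hin⟩
    have hfind : pvRules.find? (fun p => PySem.Str.isIn p.1 (PySem.Str.lower name)) =
        some (pvRules[k]'hk) := by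
      apply find?_of_least
      · rw [hstr]; exact hin
      · intro j hj hjk
        by_contra hcon
        have hfj : PySem.Chars.isIn (pvRules[j].1.toList) low = true := by
          rw [← hstr]; simpa using hcon
        have : (k : Int) ≤ (j : Int) :=
          hisMin _ ((mem_hits_iff low (j : Int)).2 ⟨j, rfl, hj, hfj⟩)
        omega
    rw [hfind]
    show ((PySem.List.pyGet? pvRules ((k : Nat) : Int)).map Prod.snd).getD "" = _
    rw [PySem.List.pyGet?_natCast]
    simp [List.getElem?_eq_getElem hk]

-- ===== VERDICT (by name: the statement is the Claim_ definition above) =====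
theorem infer_category_from_name_spec : Claim_equal_infer_category_from_name := by
  intro name _
  unfold Spec_infer_category_from_name
  rw [A_eq_find, B_eq_find]
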